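-- pv_equiv track=rewrite | github.com/shaharpalmor/AI-EX2 | py_ex2.py | calc_predictions
-- ===== SOURCE A (Python) =====
-- def calc_predictions(list_prediction):
--     labels = set(list_prediction)
--     list_lables = p_list = []
--     for i in labels:
--         list_lables.append(i)
--     list_lables.sort()
--     list = [0] * len(set(list_prediction))
--     total = len(list_prediction)
--     for j in range(len(list_prediction)):
--         for i in range(len(list_lables)):
--             if list_prediction[j] == list_lables[i]:
--                 list[i] += 1
--     return list
-- ===== SOURCE B (Python) =====
-- def calc_predictions(list_prediction):
--     out = []
--     prev = None
--     run = 0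
--     for x in sorted(list_prediction):
--         if prev is not None and x != prev:
--             out.append(run)
--             run = 0
--         prev = x
--         run += 1
--     if run:
--         out.append(run)
--     return out
-- ===== Notes on version B (the rewrite author's own statement) =====
-- stated objective: faster
-- what changed: B sorts the list once and counts consecutive runs of equal elements in a single grouped pass, instead of A's set-building plus nested per-prediction-per-label scan.
import Mathlib
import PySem

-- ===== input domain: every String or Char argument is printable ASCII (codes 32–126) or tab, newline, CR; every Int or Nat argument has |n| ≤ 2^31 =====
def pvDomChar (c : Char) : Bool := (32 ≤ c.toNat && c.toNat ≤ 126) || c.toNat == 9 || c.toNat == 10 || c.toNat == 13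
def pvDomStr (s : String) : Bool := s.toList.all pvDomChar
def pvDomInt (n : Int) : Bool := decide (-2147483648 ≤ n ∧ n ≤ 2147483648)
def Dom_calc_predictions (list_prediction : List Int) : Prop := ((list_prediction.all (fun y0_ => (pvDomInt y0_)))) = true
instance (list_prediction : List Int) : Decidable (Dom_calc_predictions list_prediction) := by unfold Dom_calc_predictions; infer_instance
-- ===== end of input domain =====

-- B replaces A's nested per-prediction/per-label scan by one grouped pass over the sorted list (same return value; A is total on Int lists, so no Pre_).

-- ===== PORT A =====
-- 'for i in labels: list_lables.append(i)' copies the set into a list which is then sorted in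
-- place; Python's set iteration order is not modelled, but sorting makes it irrelevant, so the
-- copy+sort is ported as sorting the Set's element list.  All indices produced by
-- range(len(...)) are in range, so the total forms pyGetD/pySetD are exact here.
def calc_predictions (list_prediction : List Int) : List Int :=
  let labels : PySem.Set Int := PySem.Set.ofList list_prediction
  let list_lables := PySem.List.sorted labels (fun x => x)
  let lst : List Int := List.replicate (PySem.Set.ofList list_prediction).length 0
  (PySem.List.pyRange 0 (PySem.List.len list_prediction)).foldl
    (fun lst j =>
      (PySem.List.pyRange 0 (PySem.List.len list_lables)).foldl
        (fun lst2 i =>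
          if PySem.List.pyGetD list_prediction j 0 = PySem.List.pyGetD list_lables i 0 then
            PySem.List.pySetD lst2 i (PySem.List.pyGetD lst2 i 0 + 1)
          else lst2)
        lst)
    lst

-- ===== PORT B =====
-- state = (out, prev, run); 'if run: out.append(run)' at the end
def calc_predictions_alt (list_prediction : List Int) : List Int :=
  let st :=
    (PySem.List.sorted list_prediction (fun x => x)).foldl
      (fun (st : List Int × Option Int × Int) x =>
        if st.2.1 ≠ none ∧ st.2.1 ≠ some x then (st.1 ++ [st.2.2], some x, 1)
        else (st.1, some x, st.2.2 + 1))
      ([], none, 0)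
  if st.2.2 ≠ 0 then st.1 ++ [st.2.2] else st.1

-- ===== PRECONDITION & SPEC =====
def Spec_calc_predictions (list_prediction : List Int) (out : List Int) : Prop := out = calc_predictions_alt list_prediction
instance (list_prediction : List Int) (out : List Int) : Decidable (Spec_calc_predictions list_prediction out) := by unfold Spec_calc_predictions; infer_instance

-- ===== CLAIM (what is proved, stated in full; the proofs are below) =====
def Claim_equal_calc_predictions : Prop := ∀ (list_prediction : List Int), Dom_calc_predictions list_prediction → Spec_calc_predictions list_prediction (calc_predictions list_prediction)

-- ===== LEMMAS AND PROOFS =====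

-- Both programs compute (sorted distinct labels).map (count in the input); we prove each side
-- equal to that canonical form.

-- ---- A side ----

-- a fold over shifted indices keeps the head of the accumulator untouched
lemma foldShift (x : Int) (ys : List Int) : ∀ (ks : List Nat) (a : Int) (as : List Int),
    ks.foldl (fun st k => if x = ys.getD k 0 then st.set (k+1) (st.getD (k+1) 0 + 1) else st) (a :: as)
    = a :: ks.foldl (fun st k => if x = ys.getD k 0 then st.set k (st.getD k 0 + 1) else st) as := by
  intro ks
  induction ks with
  | nil => intro a as; simp
  | cons k ks ih =>
    intro a as
    simp only [List.foldl_cons, List.set_cons_succ, List.getD_cons_succ]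
    split_ifs with h <;> exact ih _ _

-- the inner Python loop increments, at each label position, iff the current prediction equals it
lemma innerPy (x : Int) : ∀ (lbl acc : List Int), acc.length = lbl.length →
    (PySem.List.pyRange 0 (PySem.List.len lbl)).foldl
      (fun lst2 i =>
        if x = PySem.List.pyGetD lbl i 0 then
          PySem.List.pySetD lst2 i (PySem.List.pyGetD lst2 i 0 + 1)
        else lst2) acc
    = List.zipWith (fun v y => if x = y then v + 1 else v) acc lbl := by
  intro lbl
  induction lbl with
  | nil =>
    intro acc h
    cases acc with
    | nil => simp
    | cons a as => simp at h
  | cons y ys ih =>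
    intro acc h
    cases acc with
    | nil => simp at h
    | cons a as =>
      have h' : as.length = ys.length := by simpa using h
      rw [PySem.List.pyRange_zero]
      simp only [List.foldl_map, PySem.List.pyGetD_natCast, PySem.List.pySetD_natCast]
      have hlen : (PySem.List.len (y :: ys)).toNat = ys.length + 1 := by
        simp [PySem.List.len]
      rw [hlen, List.range_succ_eq_map, List.foldl_cons, List.foldl_map]
      simp only [List.getD_cons_zero, List.set_cons_zero, Nat.succ_eq_add_one,
        List.getD_cons_succ]
      have hrest := ih as h'
      rw [PySem.List.pyRange_zero] at hrest
      simp only [List.foldl_map, PySem.List.pyGetD_natCast, PySem.List.pySetD_natCast] at hrest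
      have hlen2 : (PySem.List.len ys).toNat = ys.length := by simp [PySem.List.len]
      rw [hlen2] at hrest
      by_cases hx : x = y
      · rw [if_pos hx, foldShift, hrest]
        simp [hx]
      · rw [if_neg hx, foldShift, hrest]
        simp [hx]

lemma zipFst : ∀ (acc lbl : List Int), acc.length = lbl.length →
    List.zipWith (fun v (_ : Int) => v) acc lbl = acc := by
  intro acc
  induction acc with
  | nil => intro lbl h; simp
  | cons a as ih =>
    intro lbl h
    cases lbl with
    | nil => simp at h
    | cons y ys => simpa using ih ys (by simpa using h)

lemma zipzip (g h : Int → Int → Int) : ∀ (acc lbl : List Int),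
    List.zipWith g (List.zipWith h acc lbl) lbl = List.zipWith (fun v y => g (h v y) y) acc lbl := by
  intro acc
  induction acc with
  | nil => intro lbl; simp
  | cons a as ih =>
    intro lbl
    cases lbl with
    | nil => simp
    | cons y ys => simpa using ih ys

lemma zipRepl (f : Int → Int) : ∀ (lbl : List Int),
    List.zipWith (fun v y => v + f y) (List.replicate lbl.length 0) lbl = lbl.map f := by
  intro lbl
  induction lbl with
  | nil => simp
  | cons y ys ih => simpa [List.replicate_succ] using ih

-- the whole nested A loop as a zipWith of per-label counts
lemma bigA (lbl : List Int) : ∀ (l acc : List Int), acc.length = lbl.length →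
    l.foldl (fun lst x =>
      (PySem.List.pyRange 0 (PySem.List.len lbl)).foldl
        (fun lst2 i =>
          if x = PySem.List.pyGetD lbl i 0 then
            PySem.List.pySetD lst2 i (PySem.List.pyGetD lst2 i 0 + 1)
          else lst2) lst) acc
    = List.zipWith (fun v y => v + (l.count y : Int)) acc lbl := by
  intro l
  induction l with
  | nil =>
    intro acc h
    simp only [List.foldl_nil, List.count_nil, Int.natCast_zero, add_zero]
    exact (zipFst acc lbl h).symm
  | cons x xs ih =>
    intro acc h
    simp only [List.foldl_cons]
    rw [innerPy x lbl acc h]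
    rw [ih (List.zipWith (fun v y => if x = y then v + 1 else v) acc lbl)
        (by simp [List.length_zipWith, h])]
    rw [zipzip]
    congr 1
    funext v y
    by_cases hxy : x = y
    · simp only [List.count_cons, hxy, beq_self_eq_true, if_true]
      push_cast
      ring
    · simp only [List.count_cons, beq_iff_eq, if_neg hxy, add_zero]

lemma A_char (l : List Int) :
    calc_predictions l
    = (PySem.List.sorted (PySem.Set.ofList l) (fun x => x)).map (fun y => (l.count y : Int)) := by
  show (PySem.List.pyRange 0 (PySem.List.len l)).foldl _ _ = _
  rw [PySem.List.foldl_pyRange_pyGetD l 0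
      (fun lst x =>
        (PySem.List.pyRange 0 (PySem.List.len (PySem.List.sorted (PySem.Set.ofList l) fun x => x))).foldl
          (fun lst2 i =>
            if x = PySem.List.pyGetD (PySem.List.sorted (PySem.Set.ofList l) fun x => x) i 0 then
              PySem.List.pySetD lst2 i (PySem.List.pyGetD lst2 i 0 + 1)
            else lst2) lst)
      _ (le_refl 0)]
  simp only [Int.toNat_zero, List.drop_zero]
  rw [bigA (PySem.List.sorted (PySem.Set.ofList l) (fun x => x)) l
      (List.replicate (PySem.Set.ofList l).length 0)
      (by simp [PySem.List.length_sorted])]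
  rw [show (PySem.Set.ofList l).length
      = (PySem.List.sorted (PySem.Set.ofList l) (fun x : Int => x)).length from
      (PySem.List.length_sorted _ _ _).symm]
  exact zipRepl (fun y => (l.count y : Int)) _

-- ---- B side ----

-- the tail of B's fold, as a recursive function
def gAux : Option Int → Int → List Int → List Int
  | _, run, [] => if run ≠ 0 then [run] else []
  | prev, run, x :: xs =>
    if prev ≠ none ∧ prev ≠ some x then run :: gAux (some x) 1 xs
    else gAux (some x) (run + 1) xs

lemma fold_g : ∀ (s out : List Int) (prev : Option Int) (run : Int),
    (let st := s.foldl
      (fun (st : List Int × Option Int × Int) x =>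
        if st.2.1 ≠ none ∧ st.2.1 ≠ some x then (st.1 ++ [st.2.2], some x, 1)
        else (st.1, some x, st.2.2 + 1)) (out, prev, run);
      if st.2.2 ≠ 0 then st.1 ++ [st.2.2] else st.1)
    = out ++ gAux prev run s := by
  intro s
  induction s with
  | nil =>
    intro out prev run
    simp only [List.foldl_nil, gAux]
    split_ifs <;> simp
  | cons x xs ih =>
    intro out prev run
    simp only [List.foldl_cons, gAux]
    by_cases h : prev ≠ none ∧ prev ≠ some x
    · rw [if_pos h, if_pos h, ih (out ++ [run]) (some x) 1, List.append_assoc]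
      rfl
    · rw [if_neg h, if_neg h]
      exact ih out (some x) (run + 1)

lemma grun (x : Int) : ∀ (k : Nat) (r : Int) (t : List Int),
    gAux (some x) r (List.replicate k x ++ t) = gAux (some x) (r + k) t := by
  intro k
  induction k with
  | zero => intro r t; simp
  | succ k ih =>
    intro r t
    simp only [List.replicate_succ, List.cons_append, gAux]
    rw [if_neg (by simp), ih (r + 1) t]
    congr 1
    push_cast
    ring

lemma gexit (x : Int) (r : Int) (t : List Int) (hr : r ≠ 0) (ht : ∀ y ∈ t, x < y) :
    gAux (some x) r t = r :: gAux none 0 t := by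
  cases t with
  | nil => simp [gAux, hr]
  | cons h t' =>
    have hhx : x < h := ht h (by simp)
    have hne : (some x : Option Int) ≠ some h := by
      intro hc; rw [Option.some_inj] at hc; omega
    simp [gAux, hne]

lemma B_main : ∀ (n : Nat) (s : List Int), s.length ≤ n → s.Pairwise (· ≤ ·) →
    gAux none 0 s
    = (PySem.List.sorted (PySem.Set.ofList s) (fun x => x)).map (fun y => (s.count y : Int)) := by
  intro n
  induction n with
  | zero =>
    intro s hl _
    cases s with
    | nil => decide
    | cons x xs => simp at hl
  | succ n ih =>
    intro s hl hs
    cases s with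
    | nil => decide
    | cons x xs =>
      have hxle : ∀ y ∈ xs, x ≤ y := fun y hy => List.rel_of_pairwise_cons hs hy
      have htake : ∀ b ∈ xs.takeWhile (fun y => y == x), b = x := by
        intro b hb
        have := List.mem_takeWhile_imp hb
        simpa using this
      have hxs : xs = List.replicate (xs.takeWhile (fun y => y == x)).length x
          ++ xs.dropWhile (fun y => y == x) := by
        conv_lhs => rw [← List.takeWhile_append_dropWhile (p := fun y => y == x) (l := xs)]
        rw [← List.eq_replicate_of_mem htake]
      set k := (xs.takeWhile (fun y => y == x)).length with hkdef
      set t := xs.dropWhile (fun y => y == x) with htdef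
      have hts : t.Pairwise (· ≤ ·) := by
        have hsub : t.Sublist (x :: xs) :=
          ((List.dropWhile_suffix _).sublist).trans (List.sublist_cons_self x xs)
        exact List.Pairwise.sublist hsub hs
      have hxt : ∀ y ∈ t, x < y := by
        cases ht : t with
        | nil => simp
        | cons h0 t' =>
          intro y hy
          have heq : xs.dropWhile (fun y => y == x) = h0 :: t' := htdef.symm.trans ht
          have hw : xs.dropWhile (fun y => y == x) ≠ [] := by rw [heq]; simp
          have hh0 := List.head_dropWhile_not (fun y => y == x) hw
          have hhead : (xs.dropWhile (fun y => y == x)).head hw = h0 := by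
            have h1 : (xs.dropWhile (fun y => y == x)).head? = some h0 := by rw [heq]; rfl
            have h2 := List.head?_eq_some_head (l := xs.dropWhile (fun y => y == x)) hw
            exact Option.some.inj (h2.symm.trans h1)
          rw [hhead] at hh0
          have hh0x : h0 ≠ x := by simpa using hh0
          have hh0mem : h0 ∈ xs := by
            rw [hxs, ht]; simp
          have hxh0 : x < h0 := lt_of_le_of_ne (hxle h0 hh0mem) (Ne.symm hh0x)
          rcases List.mem_cons.mp hy with rfl | hy'
          · exact hxh0
          · have hrel : h0 ≤ y := by
              have := ht ▸ hts
              exact List.rel_of_pairwise_cons this hy'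
            omega
      have hxnt : x ∉ t := fun hx => absurd (hxt x hx) (lt_irrefl x)
      have hklen : xs.length = k + t.length := by
        conv_lhs => rw [hxs]
        simp
      have hlt : t.length ≤ n := by
        simp only [List.length_cons] at hl
        omega
      have hIH := ih t hlt hts
      have hL : gAux none 0 (x :: xs) = (1 + (k : Int)) :: gAux none 0 t := by
        rw [show gAux none 0 (x :: xs) = gAux (some x) 1 xs by simp [gAux]]
        rw [hxs, grun x k 1 t]
        exact gexit x _ t (by positivity) hxt
      have hset : PySem.List.sorted (PySem.Set.ofList (x :: xs)) (fun y => y)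
          = x :: PySem.List.sorted (PySem.Set.ofList t) (fun y => y) := by
        apply PySem.List.sorted_eq_of_perm_of_pairwise_lt
        · apply List.perm_of_nodup_nodup_toFinset_eq
          · refine List.Nodup.cons ?_ ?_
            · simp [PySem.List.mem_sorted, PySem.Set.mem_ofList, hxnt]
            · exact (PySem.List.sorted_perm (PySem.Set.ofList t) (fun y : Int => y) false).symm.nodup
                (PySem.Set.nodup_ofList t)
          · exact PySem.Set.nodup_ofList _
          · ext a
            simp only [List.mem_toFinset, List.mem_cons, PySem.List.mem_sorted,
              PySem.Set.mem_ofList, hxs, List.mem_append, List.mem_replicate]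
            tauto
        · refine List.Pairwise.cons ?_ (PySem.List.sorted_ofList_pairwise_lt t)
          intro y hy
          exact hxt y (by simpa [PySem.List.mem_sorted, PySem.Set.mem_ofList] using hy)
      have hcx : (((x :: xs).count x : Nat) : Int) = 1 + (k : Int) := by
        have : (x :: xs).count x = k + 1 := by
          rw [hxs]
          simp [List.count_append,
            List.count_eq_zero.mpr hxnt]
        rw [this]
        push_cast
        ring
      have hcy : ∀ y ∈ PySem.List.sorted (PySem.Set.ofList t) (fun y : Int => y),
          (((x :: xs).count y : Nat) : Int) = ((t.count y : Nat) : Int) := by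
        intro y hy
        have hyt : y ∈ t := by
          simpa [PySem.List.mem_sorted, PySem.Set.mem_ofList] using hy
        have hyx : x ≠ y := fun hc => hxnt (hc ▸ hyt)
        congr 1
        rw [hxs]
        simp [List.count_append, List.count_replicate, hyx]
      rw [hL, hset, List.map_cons, hcx, List.map_congr_left hcy, ← hIH]

lemma B_char (l : List Int) :
    calc_predictions_alt l
    = (PySem.List.sorted (PySem.Set.ofList l) (fun x => x)).map (fun y => (l.count y : Int)) := by
  unfold calc_predictions_alt
  rw [fold_g (PySem.List.sorted l (fun x => x)) [] none 0, List.nil_append]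
  rw [B_main (PySem.List.sorted l (fun x => x)).length _ le_rfl
      (PySem.List.sorted_pairwise l (fun x => x))]
  have hperm : (PySem.List.sorted l (fun x : Int => x)).Perm l :=
    PySem.List.sorted_perm l (fun x => x) false
  have hset : PySem.List.sorted (PySem.Set.ofList (PySem.List.sorted l (fun x : Int => x))) (fun y : Int => y)
      = PySem.List.sorted (PySem.Set.ofList l) (fun y : Int => y) := by
    apply PySem.List.sorted_eq_of_perm_of_pairwise_lt
    · refine (PySem.List.sorted_perm _ _ false).trans ?_
      apply List.perm_of_nodup_nodup_toFinset_eq (PySem.Set.nodup_ofList _)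
        (PySem.Set.nodup_ofList _)
      ext a
      simp [PySem.Set.mem_ofList, hperm.mem_iff]
    · exact PySem.List.sorted_ofList_pairwise_lt _
  rw [hset]
  refine List.map_congr_left ?_
  intro y _
  rw [hperm.count_eq y]

-- ===== VERDICT (by name: the statement is the Claim_ definition above) =====
theorem calc_predictions_spec : Claim_equal_calc_predictions := by
  intro l _
  unfold Spec_calc_predictions
  rw [A_char, B_char]
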